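-- pv_equiv track=rewrite | github.com/nonaninona/algorithm | 프로그래머스/3/258709. 주사위 고르기/주사위 고르기.py | calcABsums
-- ===== SOURCE A (Python) =====
-- def calcABsums(comb, dice):
--     count = 0
--     A = []
--     B = []
--     for i in range(len(dice)):
--         if i in comb:
--             A.append(dice[i])
--         else:
--             B.append(dice[i])
--     Asums = calcSum(A, 0)
--     Bsums = calcSum(B, 0)
--     return Asums, Bsums
--
-- def calcSum(dices, step):
--     if step == len(dices)-1:
--         return dices[step]
--
--     sums = calcSum(dices, step+1)
--     ret = []
--     for s in sums:
--         for d in dices[step]: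
--             ret.append(d+s)
--     return ret
-- ===== SOURCE B (Python) =====
-- def calcABsums(comb, dice):
--     A = [dice[i] for i in range((len(dice))) if i in comb]
--     B = [dice[i] for i in range((len(dice))) if i not in comb]
--     return foldSums(A), foldSums(B)
--
--
-- def foldSums(gs):
--     res = gs[-1]
--     for g in reversed(gs[:-1]):
--         res = [d + s for s in res for d in g]
--     return res
-- ===== Notes on version B (the rewrite author's own statement) =====
-- stated objective: alternative
-- what changed: calcSum's recursion over step is replaced by an iterative fold: start from the last die's faces and fold right-to-left with a flat comprehension, and the index loop partition is replaced by two range comprehensions.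
import Mathlib
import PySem

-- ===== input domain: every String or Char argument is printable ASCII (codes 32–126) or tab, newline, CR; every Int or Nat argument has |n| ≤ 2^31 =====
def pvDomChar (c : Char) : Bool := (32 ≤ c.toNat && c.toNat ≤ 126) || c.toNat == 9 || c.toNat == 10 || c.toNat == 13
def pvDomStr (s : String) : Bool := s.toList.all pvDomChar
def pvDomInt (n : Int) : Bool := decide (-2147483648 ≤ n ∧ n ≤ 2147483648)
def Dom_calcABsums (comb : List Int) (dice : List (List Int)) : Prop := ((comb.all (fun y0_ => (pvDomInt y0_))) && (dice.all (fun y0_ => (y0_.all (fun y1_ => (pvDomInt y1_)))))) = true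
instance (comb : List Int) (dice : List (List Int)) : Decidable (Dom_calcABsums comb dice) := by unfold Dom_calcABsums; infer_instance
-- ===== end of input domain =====

-- B replaces calcSum's recursion by an iterative right-to-left fold starting at the last die (alternative decomposition, same cost); equivalence is on return values only.

-- ===== PORT A =====
-- calcSum(dices, step): recursion on step; the 'step < len' guard is a totality fuel guard only
-- (Python diverges with RecursionError exactly when dices = [], which Pre_ excludes).
def calcSumA (dices : List (List Int)) (step : Nat) : List Int :=
  if (step : Int) = (dices.length : Int) - 1 then
    PySem.List.pyGetD dices step []
  else if _h : step < dices.length then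
    let sums := calcSumA dices (step + 1)
    sums.foldl (fun ret s =>
      (PySem.List.pyGetD dices step []).foldl (fun ret d => ret ++ [d + s]) ret) []
  else []
termination_by dices.length - step

def calcABsums (comb : List Int) (dice : List (List Int)) : List Int × List Int :=
  let p := (PySem.List.pyRange 0 dice.length 1).foldl
    (fun (p : List (List Int) × List (List Int)) i =>
      if i ∈ comb then (p.1 ++ [PySem.List.pyGetD dice i []], p.2)
      else (p.1, p.2 ++ [PySem.List.pyGetD dice i []])) ([], [])
  (calcSumA p.1 0, calcSumA p.2 0)

-- ===== PORT B =====
-- foldSums(gs): res = gs[-1]; for g in reversed(gs[:-1]): res = [d+s for s in res for d in g]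
-- (gs[-1] raises IndexError on [], excluded by Pre_; the port returns [] there via getD).
def foldSumsB (gs : List (List Int)) : List Int :=
  let res := (PySem.List.pyGet? gs (-1)).getD []
  ((PySem.List.slice gs none (some (-1))).reverse).foldl
    (fun res g => res.flatMap (fun s => g.map (fun d => d + s))) res

def calcABsums_alt (comb : List Int) (dice : List (List Int)) : List Int × List Int :=
  let A := ((PySem.List.pyRange 0 dice.length 1).filter (fun i => decide (i ∈ comb))).map
    (fun i => PySem.List.pyGetD dice i [])
  let B := ((PySem.List.pyRange 0 dice.length 1).filter (fun i => decide (i ∉ comb))).map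
    (fun i => PySem.List.pyGetD dice i [])
  (foldSumsB A, foldSumsB B)

-- ===== PRECONDITION & SPEC =====
-- Pre_ excludes inputs where either group A or B is empty: there Python A never returns
-- (calcSum recurses forever, raising RecursionError) and Python B raises IndexError.
def Pre_calcABsums (comb : List Int) (dice : List (List Int)) : Prop :=
  (∃ i < dice.length, (i : Int) ∈ comb) ∧ (∃ i < dice.length, (i : Int) ∉ comb)
instance (comb : List Int) (dice : List (List Int)) : Decidable (Pre_calcABsums comb dice) := by
  unfold Pre_calcABsums; infer_instance

def pvWitness_calcABsums : List Int × List (List Int) := ([0], [[1, 2], [3, 4]])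

def Spec_calcABsums (comb : List Int) (dice : List (List Int)) (out : List Int × List Int) : Prop := out = calcABsums_alt comb dice
instance (comb : List Int) (dice : List (List Int)) (out : List Int × List Int) : Decidable (Spec_calcABsums comb dice out) := by unfold Spec_calcABsums; infer_instance

-- ===== CLAIM (what is proved, stated in full; the proofs are below) =====
def Claim_equal_calcABsums : Prop := ∀ (comb : List Int) (dice : List (List Int)), Dom_calcABsums comb dice → Pre_calcABsums comb dice → Spec_calcABsums comb dice (calcABsums comb dice)

-- ===== LEMMAS AND PROOFS =====

-- The partition loop of A equals B's two filter/map comprehensions (generic in the index list).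
theorem partition_foldl (comb : List Int) (f : Int → List Int) :
    ∀ (l : List Int) (a b : List (List Int)),
      l.foldl (fun (p : List (List Int) × List (List Int)) i =>
          if i ∈ comb then (p.1 ++ [f i], p.2) else (p.1, p.2 ++ [f i])) (a, b)
        = (a ++ (l.filter (fun i => decide (i ∈ comb))).map f,
           b ++ (l.filter (fun i => decide (i ∉ comb))).map f) := by
  intro l
  induction l with
  | nil => simp
  | cons x xs ih =>
    intro a b
    by_cases hx : x ∈ comb <;> simp [hx, ih]

-- foldSumsB on a singleton.
theorem foldSumsB_singleton (g : List Int) : foldSumsB [g] = g := by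
  simp [foldSumsB, PySem.List.pyGet?_neg_one, PySem.List.slice_to_neg_one]

-- foldSumsB peels the head when the tail is nonempty.
theorem foldSumsB_cons (g : List Int) (rest : List (List Int)) (h : rest ≠ []) :
    foldSumsB (g :: rest)
      = (foldSumsB rest).flatMap (fun s => g.map (fun d => d + s)) := by
  obtain ⟨r, rs, rfl⟩ := List.exists_cons_of_ne_nil h
  simp [foldSumsB, PySem.List.pyGet?_neg_one, PySem.List.slice_to_neg_one,
    List.getLast?_cons_cons, List.dropLast_cons₂, List.foldl_append]

-- A's double append-loop is a flatMap.
theorem double_loop_eq_flatMap (sums g : List Int) :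
    sums.foldl (fun ret s => g.foldl (fun ret d => ret ++ [d + s]) ret) []
      = sums.flatMap (fun s => g.map (fun d => d + s)) := by
  have h : ∀ s ret, g.foldl (fun ret d => ret ++ [d + s]) ret
      = ret ++ g.map (fun d => d + s) := fun s ret =>
    PySem.List.foldl_append_singleton_eq_map (fun d => d + s) g ret
  calc sums.foldl (fun ret s => g.foldl (fun ret d => ret ++ [d + s]) ret) []
      = sums.foldl (fun ret s => ret ++ g.map (fun d => d + s)) [] := by
        simp only [h]
    _ = [] ++ sums.flatMap (fun s => g.map (fun d => d + s)) :=
        PySem.List.foldl_append_eq_flatMap (fun s => g.map (fun d => d + s)) sums []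
    _ = _ := by simp

-- A's recursive calcSum computed from step equals B's fold on the remaining suffix.
theorem calcSumA_eq_foldSumsB :
    ∀ (gs : List (List Int)) (step : Nat), step < gs.length →
      calcSumA gs step = foldSumsB (gs.drop step) := by
  intro gs
  have main : ∀ (n : Nat) (step : Nat), gs.length - step ≤ n → step < gs.length →
      calcSumA gs step = foldSumsB (gs.drop step) := by
    intro n
    induction n with
    | zero => intro step hn hs; omega
    | succ n ih =>
      intro step hn hs
      by_cases hlast : (step : Int) = (gs.length : Int) - 1
      · -- base case: last die
        have hstep : step = gs.length - 1 := by omega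
        rw [calcSumA, if_pos hlast]
        have hd : gs.drop step = [gs[step]] := by
          have : gs.length - step = 1 := by omega
          rw [List.drop_eq_getElem_cons hs]
          have : gs.drop (step + 1) = [] := by
            rw [List.drop_eq_nil_iff]; omega
          rw [this]
        rw [hd, foldSumsB_singleton, PySem.List.pyGetD_ofNat gs step [] hs]
      · -- recursive case
        have hs' : step + 1 < gs.length := by omega
        rw [calcSumA, if_neg hlast, dif_pos hs]
        rw [ih (step + 1) (by omega) hs']
        rw [double_loop_eq_flatMap]
        have hd : gs.drop step = gs[step] :: gs.drop (step + 1) :=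
          List.drop_eq_getElem_cons hs
        rw [hd, foldSumsB_cons _ _ (by
          intro hnil
          rw [List.drop_eq_nil_iff] at hnil
          omega)]
        rw [PySem.List.pyGetD_ofNat gs step [] hs]
  exact fun step h => main (gs.length - step) step le_rfl h

-- ===== VERDICT (by name: the statement is the Claim_ definition above) =====
theorem calcABsums_spec : Claim_equal_calcABsums := by
  intro comb dice _hdom hpre
  unfold Spec_calcABsums calcABsums calcABsums_alt
  rw [partition_foldl comb (fun i => PySem.List.pyGetD dice i []) _ [] []]
  simp only [List.nil_append]
  obtain ⟨⟨ia, hia, hiaM⟩, ⟨ib, hib, hibM⟩⟩ := hpre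
  have hA : ((PySem.List.pyRange 0 dice.length 1).filter (fun i => decide (i ∈ comb))) ≠ [] := by
    intro hnil
    have : (ia : Int) ∈ (PySem.List.pyRange 0 dice.length 1).filter (fun i => decide (i ∈ comb)) := by
      rw [List.mem_filter, PySem.List.mem_pyRange_one]
      exact ⟨⟨by positivity, by exact_mod_cast hia⟩, by simpa using hiaM⟩
    rw [hnil] at this; exact absurd this (List.not_mem_nil)
  have hB : ((PySem.List.pyRange 0 dice.length 1).filter (fun i => decide (i ∉ comb))) ≠ [] := by
    intro hnil
    have : (ib : Int) ∈ (PySem.List.pyRange 0 dice.length 1).filter (fun i => decide (i ∉ comb)) := by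
      rw [List.mem_filter, PySem.List.mem_pyRange_one]
      exact ⟨⟨by positivity, by exact_mod_cast hib⟩, by simpa using hibM⟩
    rw [hnil] at this; exact absurd this (List.not_mem_nil)
  rw [Prod.mk.injEq]
  constructor <;>
  · rw [calcSumA_eq_foldSumsB _ 0 (by
      simp only [List.length_map]
      first
      | exact List.length_pos_of_ne_nil hA
      | exact List.length_pos_of_ne_nil hB)]
    simp
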